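-- pv_equiv track=rewrite | github.com/MteaHubHug/BioinformaticsAlgorithms | ALGORITMI U BIOINFORMATICI/BioinformaticsAlgorithms_by_Matea/AntibioticsSequencing.py | get_every_subset_family
-- ===== SOURCE A (Python) =====
-- def get_all_linear_fragments_of_cyclicPeptide(Aminoacid_peptid):
--     l=len(Aminoacid_peptid)
--     linear_fragments=[]
--     for i in range(l):
--         a= Aminoacid_peptid[i:l] + Aminoacid_peptid[0 : i]
--         linear_fragments.append(a)
--     return linear_fragments
--
-- def get_every_subset_family(Aminoacid_peptid):
--     linear_fragments=get_all_linear_fragments_of_cyclicPeptide(Aminoacid_peptid)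
--     n = len(Aminoacid_peptid)
--     arr = []
--     for a in linear_fragments:
--         for i in range(0, n):
--             for j in range(i, n):
--                 fragment=a[i:(j + 1)]
--                 if(len(fragment)<n):
--                    arr.append(fragment)
--     arr.append(Aminoacid_peptid)
--     arr=list(set(arr))
--     arr.sort()
--     return arr
-- ===== SOURCE B (Python) =====
-- def get_every_subset_family(Aminoacid_peptid):
--     # Each cyclic substring of length 1..n-1 is generated once as a window of the
--     # doubled string; no rotation list, no redundant re-generation per rotation.
--     n = len(Aminoacid_peptid)
--     doubled = Aminoacid_peptid + Aminoacid_peptid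
--     fragments = {doubled[i:i + L] for i in range(n) for L in range(1, n)}
--     fragments.add(Aminoacid_peptid)
--     return sorted(fragments)
-- ===== Notes on version B (the rewrite author's own statement) =====
-- stated objective: faster
-- what changed: Instead of enumerating all substrings of every rotation (n rotations x O(n^2) substrings, each substring re-generated n times), B reads each cyclic window exactly once as doubled[i:i+L] over start i and length L of the doubled string, then sorts the distinct set.
import Mathlib
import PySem

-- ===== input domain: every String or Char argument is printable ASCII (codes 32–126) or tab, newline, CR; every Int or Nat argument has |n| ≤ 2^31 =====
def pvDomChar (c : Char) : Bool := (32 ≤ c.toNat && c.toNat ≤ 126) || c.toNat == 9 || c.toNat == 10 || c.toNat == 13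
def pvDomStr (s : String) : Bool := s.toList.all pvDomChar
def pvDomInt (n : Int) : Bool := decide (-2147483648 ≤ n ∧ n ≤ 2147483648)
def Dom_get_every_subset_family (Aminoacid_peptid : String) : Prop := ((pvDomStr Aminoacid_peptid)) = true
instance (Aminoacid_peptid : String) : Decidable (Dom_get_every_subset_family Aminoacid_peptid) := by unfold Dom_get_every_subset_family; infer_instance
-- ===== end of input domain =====

-- B replaces A's "all substrings of all rotations" O(n^4) enumeration by generating each
-- cyclic window once from the doubled string (O(n^3) work); same sorted distinct result.

-- ===== PORT A =====
-- Python strings are carried as List Char (PySem.Chars side); wrapped to String at the end.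
def get_all_linear_fragments_of_cyclicPeptide (Aminoacid_peptid : List Char) : List (List Char) :=
  -- l = len(p); for i in range(l): linear_fragments.append(p[i:l] + p[0:i])
  (PySem.List.pyRange 0 (PySem.List.len Aminoacid_peptid) 1).foldl
    (fun acc i =>
      acc ++ [PySem.List.slice Aminoacid_peptid (some i) (some (PySem.List.len Aminoacid_peptid)) ++
              PySem.List.slice Aminoacid_peptid (some 0) (some i)]) []

def get_every_subset_family (Aminoacid_peptid : String) : List String :=
  let cs := Aminoacid_peptid.toList
  let linear_fragments := get_all_linear_fragments_of_cyclicPeptide cs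
  let n := PySem.List.len cs
  let arr := linear_fragments.foldl (fun arr a =>
    (PySem.List.pyRange 0 n 1).foldl (fun arr i =>
      (PySem.List.pyRange i n 1).foldl (fun arr j =>
        let fragment := PySem.List.slice a (some i) (some (j + 1))
        if PySem.List.len fragment < n then arr ++ [fragment] else arr) arr) arr) []
  let arr2 := arr ++ [cs]                                 -- arr.append(Aminoacid_peptid)
  let arr3 := PySem.List.sorted (PySem.Set.ofList arr2) (fun x => x) false  -- arr = list(set(arr)); arr.sort()
  arr3.map String.ofList

-- ===== PORT B =====
def get_every_subset_family_alt (Aminoacid_peptid : String) : List String :=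
  let cs := Aminoacid_peptid.toList
  let n := PySem.List.len cs
  let doubled := cs ++ cs
  -- {doubled[i:i+L] for i in range(n) for L in range(1, n)}
  let fragments := PySem.Set.ofList
    ((PySem.List.pyRange 0 n 1).foldl (fun acc i =>
      acc ++ (PySem.List.pyRange 1 n 1).map (fun L =>
        PySem.List.slice doubled (some i) (some (i + L)))) [])
  let fragments2 := PySem.Set.add fragments cs            -- fragments.add(Aminoacid_peptid)
  (PySem.List.sorted fragments2 (fun x => x) false).map String.ofList

-- ===== PRECONDITION & SPEC =====
def Spec_get_every_subset_family (Aminoacid_peptid : String) (out : List String) : Prop := out = get_every_subset_family_alt Aminoacid_peptid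
instance (Aminoacid_peptid : String) (out : List String) : Decidable (Spec_get_every_subset_family Aminoacid_peptid out) := by unfold Spec_get_every_subset_family; infer_instance

-- ===== CLAIM (what is proved, stated in full; the proofs are below) =====
def Claim_equal_get_every_subset_family : Prop := ∀ (Aminoacid_peptid : String), Dom_get_every_subset_family Aminoacid_peptid → Spec_get_every_subset_family Aminoacid_peptid (get_every_subset_family Aminoacid_peptid)

-- ===== LEMMAS AND PROOFS =====

-- the cyclic window of length L starting at p, read off the doubled peptide
def pvCyc (cs : List Char) (p L : Nat) : List Char := ((cs ++ cs).drop p).take L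

-- x is a proper (length 1 .. n-1) cyclic substring of cs
def pvIsCyc (cs x : List Char) : Prop :=
  ∃ p L : Nat, p < cs.length ∧ 1 ≤ L ∧ L < cs.length ∧ x = pvCyc cs p L

-- A's candidate list, loop shapes flattened
def pvLA (cs : List Char) : List (List Char) :=
  ((PySem.List.pyRange 0 (PySem.List.len cs) 1).map (fun k =>
      PySem.List.slice cs (some k) (some (PySem.List.len cs)) ++
      PySem.List.slice cs (some 0) (some k))).flatMap
    (fun a => (PySem.List.pyRange 0 (PySem.List.len cs) 1).flatMap (fun i =>
      ((PySem.List.pyRange i (PySem.List.len cs) 1).filter (fun j =>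
          decide (PySem.List.len (PySem.List.slice a (some i) (some (j + 1))) < PySem.List.len cs))).map
        (fun j => PySem.List.slice a (some i) (some (j + 1)))))

-- B's candidate list, loop shape flattened
def pvLB (cs : List Char) : List (List Char) :=
  (PySem.List.pyRange 0 (PySem.List.len cs) 1).flatMap (fun i =>
    (PySem.List.pyRange 1 (PySem.List.len cs) 1).map (fun L =>
      PySem.List.slice (cs ++ cs) (some i) (some (i + L))))

lemma pvA_unfold (s : String) :
    get_every_subset_family s =
      (PySem.List.sorted (PySem.Set.ofList (pvLA s.toList ++ [s.toList])) (fun x => x) false).map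
        String.ofList := by
  simp only [get_every_subset_family, get_all_linear_fragments_of_cyclicPeptide, pvLA,
    PySem.List.foldl_append_ite, PySem.List.foldl_append_eq_flatMap,
    List.nil_append, ← List.map_eq_flatMap]

lemma pvB_unfold (s : String) :
    get_every_subset_family_alt s =
      (PySem.List.sorted (PySem.Set.add (PySem.Set.ofList (pvLB s.toList)) s.toList) (fun x => x) false).map
        String.ofList := by
  simp only [get_every_subset_family_alt, pvLB, PySem.List.foldl_append_eq_flatMap,
    List.nil_append]

lemma pvCyc_length (cs : List Char) (p L : Nat) (h : p + L ≤ 2 * cs.length) :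
    (pvCyc cs p L).length = L := by
  simp [pvCyc]; omega

lemma pvRot_eq (cs : List Char) (k : Nat) (hk : k ≤ cs.length) :
    cs.drop k ++ cs.take k = ((cs ++ cs).drop k).take cs.length := by
  rw [List.drop_append_of_le_length hk, List.take_append]
  congr 1
  · rw [List.take_of_length_le (by simp)]
  · congr 1; simp; omega

lemma pvFrag (cs : List Char) (k i L : Nat) (hk : k ≤ cs.length) (hiL : i + L ≤ cs.length) :
    ((cs.drop k ++ cs.take k).drop i).take L = pvCyc cs (k + i) L := by
  rw [pvRot_eq cs k hk, pvCyc, List.drop_take, List.take_take, List.drop_drop]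
  congr 1
  omega

lemma pvCyc_reduce (cs : List Char) (p L : Nat) (hn : cs.length ≤ p) (h2 : p + L ≤ 2 * cs.length) :
    pvCyc cs p L = pvCyc cs (p - cs.length) L := by
  unfold pvCyc
  have h1 : (cs ++ cs).drop p = cs.drop (p - cs.length) := by
    rw [show p = cs.length + (p - cs.length) by omega, ← List.drop_drop, List.drop_left]
    simp
  rw [h1, List.drop_append_of_le_length (by omega), List.take_append]
  have h0 : L - (cs.drop (p - cs.length)).length = 0 := by simp; omega
  rw [h0]
  simp

lemma pvRotSlice (cs : List Char) (k : Int) (h0 : 0 ≤ k) :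
    PySem.List.slice cs (some k) (some (cs.length : Int)) ++ PySem.List.slice cs (some 0) (some k)
      = cs.drop k.toNat ++ cs.take k.toNat := by
  rw [PySem.List.slice_toNat cs h0 (by positivity)]
  simp only [PySem.List.slice_zero_start]
  rw [PySem.List.slice_to cs h0]
  congr 1
  rw [List.take_of_length_le (by simp)]

lemma pvFragSlice (a : List Char) (i j : Int) (h0 : 0 ≤ i) (hij : i ≤ j) :
    PySem.List.slice a (some i) (some (j + 1)) = (a.drop i.toNat).take (j.toNat + 1 - i.toNat) := by
  rw [PySem.List.slice_toNat a h0 (by omega)]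
  congr 1
  omega

lemma pvMemA (cs x : List Char) : x ∈ pvLA cs ↔ pvIsCyc cs x := by
  simp only [pvLA, List.mem_flatMap, List.mem_map, List.mem_filter,
    PySem.List.mem_pyRange_one, PySem.List.len_eq, decide_eq_true_eq]
  constructor
  · rintro ⟨a, ⟨k, ⟨hk0, hkn⟩, rfl⟩, i, ⟨hi0, hin⟩, j, ⟨⟨hij, hjn⟩, hlen⟩, rfl⟩
    rw [pvRotSlice cs k hk0, pvFragSlice _ i j hi0 hij] at hlen ⊢
    set k' := k.toNat with hk'
    set i' := i.toNat with hi'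
    set L := j.toNat + 1 - i.toNat with hLdef
    have hkn' : k' < cs.length := by omega
    have hiL : i' + L ≤ cs.length := by omega
    rw [pvFrag cs k' i' L (by omega) hiL] at hlen ⊢
    have hlen' : L < cs.length := by
      rw [pvCyc_length cs _ L (by omega)] at hlen
      omega
    by_cases hp : k' + i' < cs.length
    · exact ⟨k' + i', L, hp, by omega, hlen', rfl⟩
    · refine ⟨k' + i' - cs.length, L, by omega, by omega, hlen', ?_⟩
      exact pvCyc_reduce cs (k' + i') L (by omega) (by omega)
  · rintro ⟨p, L, hp, hL1, hLn, rfl⟩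
    have hfrag : PySem.List.slice (cs.drop p ++ cs.take p) (some 0) (some ((L : Int) - 1 + 1))
        = pvCyc cs p L := by
      rw [show ((L : Int) - 1) + 1 = (L : Int) by ring]
      simp only [PySem.List.slice_zero_start]
      rw [PySem.List.slice_to _ (by positivity), Int.toNat_natCast]
      have h := pvFrag cs p 0 L (le_of_lt hp) (by omega)
      simpa using h
    have hrot : PySem.List.slice cs (some (p : Int)) (some (cs.length : Int)) ++
        PySem.List.slice cs (some 0) (some (p : Int)) = cs.drop p ++ cs.take p := by
      rw [pvRotSlice cs (p : Int) (by positivity), Int.toNat_natCast]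
    refine ⟨cs.drop p ++ cs.take p, ⟨(p : Int), ⟨by positivity, by exact_mod_cast hp⟩, hrot⟩,
      (0 : Int), ⟨le_rfl, by exact_mod_cast Nat.pos_of_ne_zero (by omega)⟩,
      (L : Int) - 1, ⟨⟨by omega, by omega⟩, ?_⟩, ?_⟩
    · rw [hfrag, pvCyc_length cs p L (by omega)]
      exact_mod_cast hLn
    · exact hfrag

lemma pvMemB (cs x : List Char) : x ∈ pvLB cs ↔ pvIsCyc cs x := by
  simp only [pvLB, List.mem_flatMap, List.mem_map, PySem.List.mem_pyRange_one,
    PySem.List.len_eq]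
  constructor
  · rintro ⟨i, ⟨hi0, hin⟩, L, ⟨hL1, hLn⟩, rfl⟩
    refine ⟨i.toNat, L.toNat, by omega, by omega, by omega, ?_⟩
    rw [PySem.List.slice_toNat _ hi0 (by omega)]
    have h1 : (i + L).toNat - i.toNat = L.toNat := by omega
    rw [h1]
    rfl
  · rintro ⟨p, L, hp, hL1, hLn, rfl⟩
    refine ⟨(p : Int), ⟨by positivity, by exact_mod_cast hp⟩,
      (L : Int), ⟨by exact_mod_cast hL1, by exact_mod_cast hLn⟩, ?_⟩
    rw [PySem.List.slice_toNat _ (by positivity) (by positivity)]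
    have h1 : ((p : Int) + (L : Int)).toNat - (p : Int).toNat = L := by omega
    have h2 : ((p : Int)).toNat = p := by omega
    rw [h1, h2]
    rfl

-- ===== VERDICT (by name: the statement is the Claim_ definition above) =====
theorem get_every_subset_family_spec : Claim_equal_get_every_subset_family := by
  intro s _
  unfold Spec_get_every_subset_family
  rw [pvA_unfold, pvB_unfold]
  congr 1
  have hperm : (PySem.Set.ofList (pvLA s.toList ++ [s.toList])).Perm
      (PySem.Set.add (PySem.Set.ofList (pvLB s.toList)) s.toList) := by
    rw [List.perm_ext_iff_of_nodup (PySem.Set.nodup_ofList _)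
      (PySem.Set.nodup_add _ s.toList (PySem.Set.nodup_ofList _))]
    intro x
    simp only [PySem.Set.mem_ofList, PySem.Set.mem_add, List.mem_append, List.mem_singleton,
      pvMemA, pvMemB]
  convert PySem.List.sorted_eq_sorted_of_perm _ _ _ (fun a b h => h) hperm using 2
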